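-- pv_equiv track=rewrite | github.com/Vorlaak/Advent-of-Code | 2024/05-12/05_12(2).py | order_update
-- ===== SOURCE A (Python) =====
-- def check_rule(update, rule) :
--     (page_1, page_2) = rule
--     check = True
--     flag = True
--     if page_1 in update :
--         for page in update :
--             if page == page_1 :
--                 check = False
--             elif check and (page == page_2) :
--                 flag = False
--     return flag
--
-- def order_update(update, rules) :
--     check = True
--     for rule in rules :
--         if not check_rule(update=update, rule=rule) :
--             (numb_1, numb_2) = rule
--             (i, j) = (update.index(numb_1), update.index(numb_2))
--             update[i] = numb_2
--             update[j] = numb_1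
--             check = False
--     if check :
--         return update[len(update)//2]
--     else :
--         return order_update(update=update, rules=rules)
-- ===== SOURCE B (Python) =====
-- def order_update(update, rules):
--     # First-occurrence index map removes check_rule's per-rule scans and the
--     # repeated list.index calls; iterate passes until no rule fires.
--     # Note: like A, this mutates `update` in place; equivalence is about the return value.
--     pos = {}
--     for idx, v in enumerate(update):
--         if v not in pos:
--             pos[v] = idx
--     changed = True
--     while changed:
--         changed = False
--         for (a, b) in rules:
--             ia = pos.get(a)
--             ib = pos.get(b)
--             if ia is not None and ib is not None and ib < ia:
--                 update[ia] = b
--                 update[ib] = a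
--                 pos[a] = ib
--                 k = ib + 1
--                 while update[k] != b:
--                     k += 1
--                 pos[b] = k
--                 changed = True
--     return update[len(update) // 2]
-- ===== Notes on version B (the rewrite author's own statement) =====
-- stated objective: faster
-- what changed: B replaces A's per-rule full-list scans (check_rule plus two list.index calls per violated rule) and its tail recursion by a single first-occurrence index dictionary built once and maintained incrementally across swaps inside an iterative while loop, so each rule check costs O(1) instead of O(n).
import Mathlib
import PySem

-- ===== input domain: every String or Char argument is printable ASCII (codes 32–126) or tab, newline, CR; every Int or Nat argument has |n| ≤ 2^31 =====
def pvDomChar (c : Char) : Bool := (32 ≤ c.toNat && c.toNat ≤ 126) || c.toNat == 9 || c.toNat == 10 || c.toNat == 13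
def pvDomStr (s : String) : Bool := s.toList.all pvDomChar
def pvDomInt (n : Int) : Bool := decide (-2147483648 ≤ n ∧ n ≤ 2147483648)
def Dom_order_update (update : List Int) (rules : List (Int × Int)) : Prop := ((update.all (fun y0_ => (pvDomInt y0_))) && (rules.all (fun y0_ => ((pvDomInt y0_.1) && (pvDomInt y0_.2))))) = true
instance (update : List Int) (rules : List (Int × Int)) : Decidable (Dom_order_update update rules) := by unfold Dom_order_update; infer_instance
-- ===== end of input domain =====

-- B replaces A's per-rule list scans (check_rule + two list.index calls) by a
-- first-occurrence index map maintained across swaps, and the recursion by a while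
-- loop; both A and B mutate `update` in place in Python — the claim is about the
-- return value.

-- ===== PORT A =====
def check_rule (update : List Int) (rule : Int × Int) : Bool :=
  -- state (check, flag), branches in Python order
  if update.contains rule.1 then
    (update.foldl
      (fun (st : Bool × Bool) page =>
        if page == rule.1 then (false, st.2)
        else if st.1 && page == rule.2 then (st.1, false)
        else st)
      (true, true)).2
  else
    true

-- one `for rule in rules` pass of A's loop body, state = (update, check)
def stepA (st : List Int × Bool) (rule : Int × Int) : List Int × Bool :=
  if !check_rule st.1 rule then
    -- when check_rule is false both pages occur, so index? is `some`;
    -- the getD 0 default is unreachable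
    let i := (PySem.List.index? st.1 rule.1).getD 0
    let j := (PySem.List.index? st.1 rule.2).getD 0
    ((st.1.set i rule.2).set j rule.1, false)
  else st

def passA (rules : List (Int × Int)) (upd : List Int) : List Int × Bool :=
  rules.foldl stepA (upd, true)

-- A's tail recursion `return order_update(update, rules)`, with a fuel guard for
-- totality only (inside Pre_ the process terminates within this fuel)
def goA : Nat → List (Int × Int) → List Int → Int
  | 0, _, _ => 0
  | f + 1, rules, upd =>
    let st := passA rules upd
    if st.2 then (PySem.List.pyGet? st.1 ((st.1.length : Int) / 2)).getD 0  -- update[len//2]; none (IndexError, empty update) is outside Pre_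
    else goA f rules st.1

def order_update (update : List Int) (rules : List (Int × Int)) : Int :=
  goA (update.length * update.length + 1) rules update

-- ===== PORT B =====
-- `for idx, v in enumerate(update): if v not in pos: pos[v] = idx`
def buildPos (update : List Int) : PySem.Dict Int Int :=
  (PySem.List.enumerate update 0).foldl
    (fun pos p => if pos.contains p.2 then pos else pos.insert p.2 p.1)
    PySem.Dict.empty

-- `k = ib + 1; while update[k] != b: k += 1` scanning the suffix update[k:]
def scanB : List Int → Int → Int → Int
  | [], _, k => k        -- unreachable in B's use (b occurs in the suffix)
  | x :: xs, b, k => if x == b then k else scanB xs b (k + 1)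

-- one iteration of B's `for (a, b) in rules` loop, state = (update, pos, changed)
def stepB (st : List Int × PySem.Dict Int Int × Bool) (rule : Int × Int) :
    List Int × PySem.Dict Int Int × Bool :=
  match st.2.1.get? rule.1, st.2.1.get? rule.2 with
  | some ia, some ib =>
    if ib < ia then
      let upd' := (st.1.set ia.toNat rule.2).set ib.toNat rule.1
      let pos' := (st.2.1.insert rule.1 ib).insert rule.2
          (scanB (upd'.drop (ib.toNat + 1)) rule.2 (ib + 1))
      (upd', pos', true)
    else st
  | _, _ => st

def passB (rules : List (Int × Int)) (st : List Int × PySem.Dict Int Int × Bool) :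
    List Int × PySem.Dict Int Int × Bool :=
  rules.foldl stepB st

-- B's `while changed` loop, same fuel guard for totality
def goB : Nat → List (Int × Int) → List Int × PySem.Dict Int Int → Int
  | 0, _, _ => 0
  | f + 1, rules, st =>
    let st' := passB rules (st.1, st.2, false)
    if st'.2.2 then goB f rules (st'.1, st'.2.1)
    else (PySem.List.pyGet? st'.1 ((st'.1.length : Int) / 2)).getD 0

def order_update_alt (update : List Int) (rules : List (Int × Int)) : Int :=
  goB (update.length * update.length + 1) rules (update, buildPos update)

-- ===== PRECONDITION & SPEC =====
-- helpers for Pre_: bounded reachability in the graph of rules restricted to update's elements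
def pvSuccs (update : List Int) (rules : List (Int × Int)) (v : Int) : List Int :=
  (rules.filter (fun r => r.1 == v && update.contains r.2 && r.2 != v)).map (·.2)

def pvGrow (update : List Int) (rules : List (Int × Int)) (s : List Int) : List Int :=
  rules.foldl
    (fun s r =>
      if s.contains r.1 && update.contains r.2 && r.2 != r.1 && !s.contains r.2 then s ++ [r.2]
      else s)
    s

def pvHasCycle (update : List Int) (rules : List (Int × Int)) : Bool :=
  update.any (fun v => ((pvGrow update rules)^[update.length] (pvSuccs update rules v)).contains v)

-- Pre_ excludes exactly the inputs on which Python A raises: the empty update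
-- (IndexError on update[len//2]) and inputs whose rules, restricted to the pages
-- present in update, contain a cycle — there A recurses forever (RecursionError).
def Pre_order_update (update : List Int) (rules : List (Int × Int)) : Prop :=
  update ≠ [] ∧ pvHasCycle update rules = false
instance (update : List Int) (rules : List (Int × Int)) : Decidable (Pre_order_update update rules) := by
  unfold Pre_order_update; infer_instance

def pvWitness_order_update : List Int × (List (Int × Int)) := ([3, 1, 2], [(1, 2), (2, 3)])

def Spec_order_update (update : List Int) (rules : List (Int × Int)) (out : Int) : Prop := out = order_update_alt update rules
instance (update : List Int) (rules : List (Int × Int)) (out : Int) : Decidable (Spec_order_update update rules out) := by unfold Spec_order_update; infer_instance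

-- ===== CLAIM (what is proved, stated in full; the proofs are below) =====
def Claim_equal_order_update : Prop := ∀ (update : List Int) (rules : List (Int × Int)), Dom_order_update update rules → Pre_order_update update rules → Spec_order_update update rules (order_update update rules)

-- ===== LEMMAS AND PROOFS =====

-- the invariant tying B's index map to first occurrences in the current list
def PvInv (upd : List Int) (pos : PySem.Dict Int Int) : Prop :=
  ∀ c : Int, pos.get? c = (PySem.List.index? upd c).map (fun n => (n : Int))

-- index? from a witness position (converse of PySem.List.getElem_of_index?_eq_some)
theorem idx_intro (xs : List Int) (v : Int) (i : Nat)
    (h1 : xs[i]? = some v) (hmin : ∀ m, m < i → xs[m]? ≠ some v) :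
    PySem.List.index? xs v = some i := by
  induction xs generalizing i with
  | nil => simp at h1
  | cons x xs ih =>
    cases i with
    | zero =>
      simp at h1; subst h1
      exact PySem.List.index?_cons_self x xs
    | succ n =>
      have hx : x ≠ v := by
        have := hmin 0 (Nat.succ_pos n); simpa using this
      rw [PySem.List.index?_cons_of_ne _ hx]
      have hrec := ih n (by simpa using h1)
        (fun m hm => by have := hmin (m + 1) (by omega); simpa using this)
      rw [hrec]
      rfl

theorem idx_char (xs : List Int) (v : Int) (k : Nat)
    (h : PySem.List.index? xs v = some k) :
    xs[k]? = some v ∧ ∀ m, m < k → xs[m]? ≠ some v := by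
  obtain ⟨hk, hv, hmin⟩ := PySem.List.getElem_of_index?_eq_some h
  refine ⟨by simp [List.getElem?_eq_getElem hk, hv], fun m hm hc => ?_⟩
  have hml : m < xs.length := lt_trans hm hk
  rw [List.getElem?_eq_getElem hml] at hc
  exact hmin m hm (by simpa using hc)

theorem scanB_eq (l : List Int) (b : Int) (s : Int) (k : Nat)
    (h : PySem.List.index? l b = some k) : scanB l b s = s + k := by
  induction l generalizing s k with
  | nil => simp [PySem.List.index?_eq_idxOf?, List.idxOf?] at h
  | cons x xs ih =>
    by_cases hx : x = b
    · subst hx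
      rw [PySem.List.index?_cons_self] at h
      cases h
      simp [scanB]
    · rw [PySem.List.index?_cons_of_ne _ hx] at h
      cases hk : PySem.List.index? xs b with
      | none => rw [hk] at h; simp at h
      | some k' =>
        rw [hk] at h; simp at h
        have : scanB (x :: xs) b s = scanB xs b (s + 1) := by simp [scanB, hx]
        rw [this, ih (s + 1) k' hk, ← h]
        push_cast; ring

-- the body of check_rule's fold, with the rule fixed
def crStep (a b : Int) (st : Bool × Bool) (page : Int) : Bool × Bool :=
  if page == a then (false, st.2)
  else if st.1 && page == b then (st.1, false)
  else st

theorem check_rule_eq_fold (upd : List Int) (a b : Int) :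
    check_rule upd (a, b) =
      (if upd.contains a then (upd.foldl (crStep a b) (true, true)).2 else true) := rfl

theorem cr_fold_frozen (a b : Int) (l : List Int) (flag : Bool) :
    l.foldl (crStep a b) (false, flag) = (false, flag) := by
  induction l with
  | nil => rfl
  | cons x xs ih =>
    simp only [List.foldl_cons, crStep]
    split_ifs with h1 h2 <;> simp_all

theorem cr_fold_flagfalse (a b : Int) (l : List Int) (chk : Bool) :
    (l.foldl (crStep a b) (chk, false)).2 = false := by
  induction l generalizing chk with
  | nil => rfl
  | cons x xs ih =>
    simp only [List.foldl_cons, crStep]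
    split_ifs <;> simp [ih]

theorem cr_fold_iff (a b : Int) (l : List Int) :
    (l.foldl (crStep a b) (true, true)).2 = false ↔
      ∃ j : Nat, PySem.List.index? l b = some j ∧
        ∀ i : Nat, PySem.List.index? l a = some i → j < i := by
  induction l with
  | nil =>
    simp [PySem.List.index?_eq_idxOf?, List.idxOf?]
  | cons x xs ih =>
    by_cases hxa : x = a
    · subst hxa
      have : (x :: xs).foldl (crStep x b) (true, true) = (false, true) := by
        simp only [List.foldl_cons, crStep, BEq.rfl, if_pos]
        simpa using cr_fold_frozen x b xs true
      rw [this]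
      simp only [PySem.List.index?_cons_self]
      constructor
      · intro h; simp at h
      · rintro ⟨j, _, hj⟩
        have := hj 0 rfl; omega
    · by_cases hxb : x = b
      · subst hxb
        have hstep : crStep a x (true, true) x = (true, false) := by
          simp [crStep, hxa]
        have : ((x :: xs).foldl (crStep a x) (true, true)).2 = false := by
          simp only [List.foldl_cons, hstep]
          exact cr_fold_flagfalse a x xs true
        rw [this]
        simp only [true_iff]
        refine ⟨0, PySem.List.index?_cons_self x xs, fun i hi => ?_⟩
        rw [PySem.List.index?_cons_of_ne _ hxa] at hi
        cases h' : PySem.List.index? xs a with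
        | none => rw [h'] at hi; simp at hi
        | some i' => rw [h'] at hi; simp at hi; omega
      · have hstep : crStep a b (true, true) x = (true, true) := by
          simp [crStep, hxa, hxb]
        rw [List.foldl_cons, hstep, ih,
          PySem.List.index?_cons_of_ne _ hxa, PySem.List.index?_cons_of_ne _ hxb]
        constructor
        · rintro ⟨j, hj, hmin⟩
          refine ⟨j + 1, by rw [hj]; rfl, fun i hi => ?_⟩
          cases h' : PySem.List.index? xs a with
          | none => rw [h'] at hi; simp at hi
          | some i' =>
            rw [h'] at hi; simp at hi
            have := hmin i' h'; omega
        · rintro ⟨j, hj, hmin⟩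
          cases h' : PySem.List.index? xs b with
          | none => rw [h'] at hj; simp at hj
          | some j' =>
            rw [h'] at hj
            have hj' : j = j' + 1 := by simpa using hj.symm
            refine ⟨j', rfl, fun i hi => ?_⟩
            have := hmin (i + 1) (by rw [hi]; rfl)
            omega

theorem cr_iff (upd : List Int) (a b : Int) :
    check_rule upd (a, b) = false ↔
      ∃ i j : Nat, PySem.List.index? upd a = some i ∧
        PySem.List.index? upd b = some j ∧ j < i := by
  rw [check_rule_eq_fold]
  by_cases hc : upd.contains a
  · rw [if_pos hc, cr_fold_iff]
    have ha : a ∈ upd := by simpa using hc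
    obtain ⟨i0, hi0⟩ : ∃ i0, PySem.List.index? upd a = some i0 := by
      have := (PySem.List.index?_isSome_iff upd a).2 ha
      exact Option.isSome_iff_exists.1 this
    constructor
    · rintro ⟨j, hj, hmin⟩
      exact ⟨i0, j, hi0, hj, hmin i0 hi0⟩
    · rintro ⟨i, j, hi, hj, hij⟩
      refine ⟨j, hj, fun i' hi' => ?_⟩
      rw [hi] at hi'; cases hi'; exact hij
  · rw [if_neg hc]
    simp only [Bool.true_eq_false, false_iff]
    rintro ⟨i, j, hi, _, _⟩
    exact hc (by
      have : a ∈ upd := (PySem.List.index?_isSome_iff upd a).1 (by rw [hi]; rfl)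
      simpa using this)

-- the swapped list and its first-occurrence indices
theorem swap_getElem? (upd : List Int) (a b : Int) (i j : Nat)
    (hi : i < upd.length) (hj : j < upd.length) (m : Nat) (hm : m < upd.length) :
    ((upd.set i b).set j a)[m]? =
      some (if m = j then a else if m = i then b else upd[m]) := by
  rw [List.getElem?_set, List.getElem?_set]
  by_cases h1 : m = j
  · rw [if_pos h1.symm, if_pos (by simpa using hj), if_pos h1]
  · rw [if_neg (fun h => h1 h.symm), if_neg h1]
    by_cases h2 : m = i
    · rw [if_pos h2.symm, if_pos hi, if_pos h2]
    · rw [if_neg (fun h => h2 h.symm), if_neg h2, List.getElem?_eq_getElem hm]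

theorem swap_idx_a (upd : List Int) (a b : Int) (i j : Nat)
    (ha : PySem.List.index? upd a = some i) (hb : PySem.List.index? upd b = some j)
    (hji : j < i) :
    PySem.List.index? ((upd.set i b).set j a) a = some j := by
  obtain ⟨ha1, ha2⟩ := idx_char upd a i ha
  obtain ⟨hb1, hb2⟩ := idx_char upd b j hb
  have hi : i < upd.length := by
    by_contra h; rw [List.getElem?_eq_none (by omega)] at ha1; simp at ha1
  have hj : j < upd.length := by omega
  apply idx_intro
  · rw [swap_getElem? upd a b i j hi hj j hj]; simp
  · intro m hm
    rw [swap_getElem? upd a b i j hi hj m (by omega)]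
    rw [if_neg (by omega), if_neg (by omega)]
    intro hc
    exact ha2 m (by omega) (by rw [List.getElem?_eq_getElem (by omega : m < upd.length)]; simpa using hc)

theorem swap_idx_other (upd : List Int) (a b c : Int) (i j : Nat)
    (ha : PySem.List.index? upd a = some i) (hb : PySem.List.index? upd b = some j)
    (hji : j < i) (hca : c ≠ a) (hcb : c ≠ b) :
    PySem.List.index? ((upd.set i b).set j a) c = PySem.List.index? upd c := by
  obtain ⟨ha1, ha2⟩ := idx_char upd a i ha
  obtain ⟨hb1, hb2⟩ := idx_char upd b j hb
  have hi : i < upd.length := by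
    by_contra h; rw [List.getElem?_eq_none (by omega)] at ha1; simp at ha1
  have hj : j < upd.length := by omega
  cases hcidx : PySem.List.index? upd c with
  | none =>
    have hcnot : c ∉ upd := (PySem.List.index?_eq_none_iff upd c).1 hcidx
    rw [PySem.List.index?_eq_none_iff]
    intro hmem
    obtain ⟨m, hm, hval⟩ := List.mem_iff_getElem.1 hmem
    have hm' : m < upd.length := by simpa using hm
    have := swap_getElem? upd a b i j hi hj m hm'
    rw [List.getElem?_eq_getElem hm] at this
    have hv2 : (if m = j then a else if m = i then b else upd[m]) = c := by
      have := this; simp at this; rw [hval] at this; exact this.symm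
    split_ifs at hv2 with h1 h2
    · exact hca hv2.symm
    · exact hcb hv2.symm
    · exact hcnot (hv2 ▸ List.getElem_mem hm')
  | some k =>
    obtain ⟨hc1, hc2⟩ := idx_char upd c k hcidx
    have hk : k < upd.length := by
      by_contra h; rw [List.getElem?_eq_none (by omega)] at hc1; simp at hc1
    have hki : k ≠ i := by
      intro h; subst h
      rw [List.getElem?_eq_getElem hk] at ha1 hc1
      simp at ha1 hc1; exact hca (hc1 ▸ ha1 ▸ rfl)
    have hkj : k ≠ j := by
      intro h; subst h
      rw [List.getElem?_eq_getElem hk] at hb1 hc1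
      simp at hb1 hc1; exact hcb (hc1 ▸ hb1 ▸ rfl)
    apply idx_intro
    · rw [swap_getElem? upd a b i j hi hj k hk, if_neg hkj, if_neg hki]
      rw [List.getElem?_eq_getElem hk] at hc1; simpa using hc1
    · intro m hm
      rw [swap_getElem? upd a b i j hi hj m (by omega)]
      split_ifs with h1 h2
      · intro h; injection h with h'; exact hca h'.symm
      · intro h; injection h with h'; exact hcb h'.symm
      · intro h
        exact hc2 m hm (by rw [List.getElem?_eq_getElem (by omega : m < upd.length)]; simpa using h)

theorem swap_idx_b (upd : List Int) (a b : Int) (i j : Nat)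
    (ha : PySem.List.index? upd a = some i) (hb : PySem.List.index? upd b = some j)
    (hji : j < i) :
    ∃ t : Nat,
      PySem.List.index? (((upd.set i b).set j a).drop (j + 1)) b = some t ∧
      PySem.List.index? ((upd.set i b).set j a) b = some (j + 1 + t) := by
  obtain ⟨ha1, ha2⟩ := idx_char upd a i ha
  obtain ⟨hb1, hb2⟩ := idx_char upd b j hb
  have hi : i < upd.length := by
    by_contra h; rw [List.getElem?_eq_none (by omega)] at ha1; simp at ha1
  have hj : j < upd.length := by omega
  have hab : a ≠ b := by
    intro h; subst h; rw [ha] at hb; cases hb; omega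
  have hlen : ((upd.set i b).set j a).length = upd.length := by simp
  have hgetb : ((upd.set i b).set j a)[i]? = some b := by
    rw [swap_getElem? upd a b i j hi hj i hi, if_neg (by omega), if_pos rfl]
  -- b occurs in the dropped suffix
  have hmem : b ∈ ((upd.set i b).set j a).drop (j + 1) := by
    have : (((upd.set i b).set j a).drop (j + 1))[i - (j + 1)]? = some b := by
      rw [List.getElem?_drop, (by omega : j + 1 + (i - (j + 1)) = i)]
      exact hgetb
    exact List.mem_of_getElem? this
  obtain ⟨t, ht⟩ : ∃ t, PySem.List.index? (((upd.set i b).set j a).drop (j + 1)) b = some t :=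
    Option.isSome_iff_exists.1 ((PySem.List.index?_isSome_iff _ b).2 hmem)
  obtain ⟨ht1, ht2⟩ := idx_char _ b t ht
  refine ⟨t, ht, ?_⟩
  apply idx_intro
  · rw [← List.getElem?_drop]
    exact ht1
  · intro m hm
    have htlen : t < ((upd.set i b).set j a).length - (j + 1) := by
      by_contra h
      rw [List.getElem?_eq_none (by simp; omega)] at ht1
      simp at ht1
    have hmlen : m < upd.length := by omega
    by_cases h1 : m < j
    · rw [swap_getElem? upd a b i j hi hj m hmlen, if_neg (by omega), if_neg (by omega)]
      intro hc
      exact hb2 m h1 (by rw [List.getElem?_eq_getElem hmlen]; simpa using hc)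
    · by_cases h2 : m = j
      · rw [swap_getElem? upd a b i j hi hj m hmlen, if_pos h2]
        intro hc
        injection hc with hc'
        exact hab hc'
      · have hm1 : j + 1 ≤ m := by omega
        have : ((upd.set i b).set j a)[m]? = (((upd.set i b).set j a).drop (j + 1))[m - (j + 1)]? := by
          rw [List.getElem?_drop, (by omega : j + 1 + (m - (j + 1)) = m)]
        rw [this]
        exact ht2 (m - (j + 1)) (by omega)

-- relation between A's and B's per-pass states
def PvRel (sA : List Int × Bool) (sB : List Int × PySem.Dict Int Int × Bool) : Prop :=
  sA.1 = sB.1 ∧ sA.2 = !sB.2.2 ∧ PvInv sA.1 sB.2.1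

theorem step_rel (r : Int × Int) (sA : List Int × Bool)
    (sB : List Int × PySem.Dict Int Int × Bool) (h : PvRel sA sB) :
    PvRel (stepA sA r) (stepB sB r) := by
  obtain ⟨upd, chk⟩ := sA
  obtain ⟨updB, pos, ch⟩ := sB
  obtain ⟨h1, h2, h3⟩ := h
  simp only at h1 h2 h3
  subst h1
  obtain ⟨a, b⟩ := r
  by_cases e : check_rule upd (a, b) = false
  · obtain ⟨i, j, ha, hb, hji⟩ := (cr_iff upd a b).1 e
    have hab : a ≠ b := by
      intro h; subst h; rw [ha] at hb; cases hb; omega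
    have hgA : pos.get? a = some (i : Int) := by rw [h3 a, ha]; rfl
    have hgB : pos.get? b = some (j : Int) := by rw [h3 b, hb]; rfl
    have hAstep : stepA (upd, chk) (a, b) =
        ((upd.set i b).set j a, false) := by
      simp only [stepA, e, Bool.not_false, if_pos, ha, hb]
      rfl
    have hlt : (j : Int) < (i : Int) := by exact_mod_cast hji
    obtain ⟨t, htdrop, htfull⟩ := swap_idx_b upd a b i j ha hb hji
    have hBstep : stepB (upd, pos, ch) (a, b) =
        ((upd.set i b).set j a,
         (pos.insert a (j : Int)).insert b
           (scanB (((upd.set i b).set j a).drop (j + 1)) b ((j : Int) + 1)), true) := by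
      simp only [stepB, hgA, hgB]
      rw [if_pos hlt]
      simp [Int.toNat_natCast]
    rw [hAstep, hBstep]
    refine ⟨rfl, rfl, ?_⟩
    intro c
    by_cases hcb : c = b
    · subst hcb
      rw [PySem.Dict.get?_insert_self, htfull, scanB_eq _ _ _ t htdrop]
      simp
    · rw [show ((pos.insert a ((j : Nat) : Int)).insert b
          (scanB (((upd.set i b).set j a).drop (j + 1)) b ((j : Int) + 1))).get? c
          = (pos.insert a ((j : Nat) : Int)).get? c from
          PySem.Dict.get?_insert_of_ne _ _ hcb]
      by_cases hca : c = a
      · subst hca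
        rw [PySem.Dict.get?_insert_self]
        rw [swap_idx_a _ _ _ _ _ ha hb hji]
        rfl
      · rw [PySem.Dict.get?_insert_of_ne _ _ hca, h3 c,
          swap_idx_other upd a b c i j ha hb hji hca hcb]
  · have e' : check_rule upd (a, b) = true := by
      cases h : check_rule upd (a, b)
      · exact absurd h e
      · rfl
    have hAstep : stepA (upd, chk) (a, b) = (upd, chk) := by
      simp [stepA, e']
    rw [hAstep]
    have hBstep : stepB (upd, pos, ch) (a, b) = (upd, pos, ch) := by
      simp only [stepB]
      cases hA : pos.get? a with
      | none => rfl
      | some ia =>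
        cases hB : pos.get? b with
        | none => rfl
        | some ib =>
          simp only
          rw [if_neg]
          intro hlt
          rw [h3 a] at hA
          rw [h3 b] at hB
          cases hia : PySem.List.index? upd a with
          | none => rw [hia] at hA; simp at hA
          | some i =>
            cases hib : PySem.List.index? upd b with
            | none => rw [hib] at hB; simp at hB
            | some j =>
              rw [hia] at hA; rw [hib] at hB
              have h4 : ((i : Nat) : Int) = ia := by simpa using hA
              have h5 : ((j : Nat) : Int) = ib := by simpa using hB
              subst h4; subst h5
              have hji : j < i := by exact_mod_cast hlt
              exact e ((cr_iff upd a b).2 ⟨i, j, hia, hib, hji⟩)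
    rw [hBstep]
    exact ⟨rfl, h2, h3⟩

theorem pass_rel (rules : List (Int × Int)) (sA : List Int × Bool)
    (sB : List Int × PySem.Dict Int Int × Bool) (h : PvRel sA sB) :
    PvRel (rules.foldl stepA sA) (rules.foldl stepB sB) := by
  induction rules generalizing sA sB with
  | nil => exact h
  | cons r rs ih => exact ih _ _ (step_rel r sA sB h)

theorem go_sim (f : Nat) (rules : List (Int × Int)) (upd : List Int)
    (pos : PySem.Dict Int Int) (hInv : PvInv upd pos) :
    goA f rules upd = goB f rules (upd, pos) := by
  induction f generalizing upd pos with
  | zero => rfl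
  | succ f ih =>
    have hrel : PvRel (passA rules upd) (passB rules (upd, pos, false)) :=
      pass_rel rules (upd, true) (upd, pos, false) ⟨rfl, rfl, hInv⟩
    obtain ⟨h1, h2, h3⟩ := hrel
    simp only [goA, goB]
    cases hc : (passB rules (upd, pos, false)).2.2 with
    | true =>
      rw [hc] at h2
      simp only [h2]
      simp only [Bool.not_true, Bool.false_eq_true, if_false, if_true]
      rw [h1] at h3 ⊢
      exact ih _ _ h3
    | false =>
      rw [hc] at h2
      simp only [h2]
      simp only [Bool.not_false, Bool.false_eq_true, if_false, if_true]
      rw [h1]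

-- the initial index map is the first-occurrence map
theorem build_aux (l : List Int) (s : Int) (pos : PySem.Dict Int Int) (c : Int) :
    ((PySem.List.enumerate l s).foldl
        (fun pos p => if pos.contains p.2 then pos else pos.insert p.2 p.1) pos).get? c =
      (if pos.contains c then pos.get? c
       else (PySem.List.index? l c).map (fun n => s + (n : Int))) := by
  induction l generalizing s pos with
  | nil =>
    simp only [PySem.List.enumerate_nil, List.foldl_nil]
    cases hc : pos.contains c with
    | true => simp
    | false =>
      rw [if_neg (by simp)]
      rw [(PySem.Dict.get?_eq_none_iff_contains pos c).2 hc]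
      simp [PySem.List.index?_eq_idxOf?, List.idxOf?]
  | cons x xs ih =>
    rw [PySem.List.enumerate_cons, List.foldl_cons]
    rw [ih (s + 1) _ ]
    by_cases hcx : c = x
    · subst hcx
      have hcont : (if pos.contains c then pos else pos.insert c s).contains c = true := by
        cases h : pos.contains c
        · simp [PySem.Dict.contains_insert_self]
        · simp [h]
      rw [if_pos hcont]
      cases h : pos.contains c with
      | true => simp
      | false =>
        rw [if_neg (by simp)]
        simp only [if_neg Bool.false_ne_true]
        rw [PySem.Dict.get?_insert_self]
        rw [PySem.List.index?_cons_self]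
        simp
    · have hcont : (if pos.contains x then pos else pos.insert x s).contains c
          = pos.contains c := by
        cases h : pos.contains x
        · simp only [if_neg Bool.false_ne_true]
          rw [PySem.Dict.contains_insert]
          simp [show (c == x) = false by simpa using hcx]
        · simp
      rw [hcont]
      have hget : (if pos.contains x then pos else pos.insert x s).get? c = pos.get? c := by
        cases h : pos.contains x
        · simp only [if_neg Bool.false_ne_true]
          exact PySem.Dict.get?_insert_of_ne _ _ hcx
        · simp
      rw [hget]
      cases h : pos.contains c with
      | true => simp
      | false =>
        simp only [if_neg Bool.false_ne_true]
        rw [PySem.List.index?_cons_of_ne _ (fun h => hcx h.symm)]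
        cases hidx : PySem.List.index? xs c <;> simp
        ring

theorem Inv_build (update : List Int) : PvInv update (buildPos update) := by
  intro c
  unfold buildPos
  rw [build_aux update 0 PySem.Dict.empty c]
  rw [if_neg (by simp [PySem.Dict.contains_empty])]
  cases h : PySem.List.index? update c <;> simp

-- ===== VERDICT (by name: the statement is the Claim_ definition above) =====
theorem order_update_spec : Claim_equal_order_update := by
  intro update rules _ _
  unfold Spec_order_update order_update order_update_alt
  exact go_sim _ rules update (buildPos update) (Inv_build update)
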